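-- pv_equiv track=rewrite | github.com/SGTTM-IFPR/SGTTM | back/service/service_id_proxima_partida.py | criar_dicionario_id_proxima_partida
-- ===== SOURCE A (Python) =====
-- def criar_dicionario_id_proxima_partida(partidas):
--     dicionario = {}
--
--     for chave, valores in partidas.items():
--         id_proxima_partida = None
--         for partida_id, origem_ids in partidas.items():
--             if chave in origem_ids:
--                 id_proxima_partida = partida_id
--                 break
--         dicionario[chave] = id_proxima_partida
--
--     return dicionario
-- ===== SOURCE B (Python) =====
-- def criar_dicionario_id_proxima_partida(partidas):
--     # one pass builds a reverse index: origem id -> first partida that lists it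
--     primeiro = {}
--     for partida_id, origem_ids in partidas.items():
--         for o in origem_ids:
--             if o not in primeiro:
--                 primeiro[o] = partida_id
--     return {chave: primeiro.get(chave) for chave in partidas}
-- ===== Notes on version B (the rewrite author's own statement) =====
-- stated objective: faster
-- what changed: Replaces the per-key scan over all partidas with a reverse index origem->first partida built in one pass, then O(1) lookups.
import Mathlib
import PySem

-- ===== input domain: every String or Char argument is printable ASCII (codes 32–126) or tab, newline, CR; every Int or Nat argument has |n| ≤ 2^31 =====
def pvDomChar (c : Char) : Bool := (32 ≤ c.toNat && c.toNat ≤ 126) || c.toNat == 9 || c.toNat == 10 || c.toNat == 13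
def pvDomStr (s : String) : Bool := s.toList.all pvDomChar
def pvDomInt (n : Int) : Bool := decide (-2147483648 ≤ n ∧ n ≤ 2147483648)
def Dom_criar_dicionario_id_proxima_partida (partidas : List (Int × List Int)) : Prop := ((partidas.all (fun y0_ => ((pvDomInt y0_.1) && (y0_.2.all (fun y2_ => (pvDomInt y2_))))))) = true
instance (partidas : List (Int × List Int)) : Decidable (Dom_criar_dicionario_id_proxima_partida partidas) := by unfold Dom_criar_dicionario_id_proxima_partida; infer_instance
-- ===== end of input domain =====

-- B replaces A's per-key scan of all partidas with a reverse index (origem id -> first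
-- partida listing it) built in one pass, then a single lookup per key: faster (asymptotic).


-- ===== PORT A =====
-- inner loop of A: 'id_proxima_partida = None; for partida_id, origem_ids in partidas.items():
--   if chave in origem_ids: id_proxima_partida = partida_id; break'
def pvInnerA (partidas : List (Int × List Int)) (chave : Int) : Option Int :=
  match partidas with
  | [] => none
  | (partida_id, origem_ids) :: rest =>
      if chave ∈ origem_ids then some partida_id else pvInnerA rest chave

def criar_dicionario_id_proxima_partida (partidas : List (Int × List Int)) : List (Int × Option Int) :=
  (partidas.foldl
      (fun (dicionario : PySem.Dict Int (Option Int)) p =>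
        dicionario.insert p.1 (pvInnerA partidas p.1))
      PySem.Dict.empty).items

-- ===== PORT B =====
-- 'primeiro' built in one pass: for partida_id, origem_ids: for o in origem_ids:
--   if o not in primeiro: primeiro[o] = partida_id
def pvIndexB (partidas : List (Int × List Int)) : PySem.Dict Int Int :=
  partidas.foldl
    (fun primeiro p =>
      p.2.foldl (fun primeiro o => if primeiro.contains o then primeiro else primeiro.insert o p.1) primeiro)
    PySem.Dict.empty

def criar_dicionario_id_proxima_partida_alt (partidas : List (Int × List Int)) : List (Int × Option Int) :=
  partidas.map (fun p => (p.1, (pvIndexB partidas).get? p.1))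

-- ===== PRECONDITION & SPEC =====
-- The argument is a Python dict: its association-list image has pairwise-distinct keys.
-- Pre_ excludes only duplicate-key lists, which no Python dict produces.
def Pre_criar_dicionario_id_proxima_partida (partidas : List (Int × List Int)) : Prop :=
  (partidas.map Prod.fst).Nodup
instance (partidas : List (Int × List Int)) : Decidable (Pre_criar_dicionario_id_proxima_partida partidas) := by unfold Pre_criar_dicionario_id_proxima_partida; infer_instance

def pvWitness_criar_dicionario_id_proxima_partida : (List (Int × List Int)) := [(1, [2]), (2, [1, 3]), (3, [])]

def Spec_criar_dicionario_id_proxima_partida (partidas : List (Int × List Int)) (out : List (Int × Option Int)) : Prop := out = criar_dicionario_id_proxima_partida_alt partidas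
instance (partidas : List (Int × List Int)) (out : List (Int × Option Int)) : Decidable (Spec_criar_dicionario_id_proxima_partida partidas out) := by unfold Spec_criar_dicionario_id_proxima_partida; infer_instance

-- ===== CLAIM (what is proved, stated in full; the proofs are below) =====
def Claim_equal_criar_dicionario_id_proxima_partida : Prop := ∀ (partidas : List (Int × List Int)), Dom_criar_dicionario_id_proxima_partida partidas → Pre_criar_dicionario_id_proxima_partida partidas → Spec_criar_dicionario_id_proxima_partida partidas (criar_dicionario_id_proxima_partida partidas)

-- ===== LEMMAS AND PROOFS =====

theorem pv_get?_innerFold (os : List Int) (pid : Int) :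
    ∀ (d : PySem.Dict Int Int) (x : Int),
    (os.foldl (fun d o => if d.contains o then d else d.insert o pid) d).get? x
      = (d.get? x).or (if x ∈ os then some pid else none) := by
  induction os with
  | nil => intro d x; simp
  | cons o os ih =>
    intro d x
    simp only [List.foldl_cons, ih]
    by_cases hc : d.contains o = true
    · simp only [hc, if_pos]
      by_cases hx : x = o
      · subst hx
        have : (d.get? x).isSome := by rw [← PySem.Dict.contains_eq_isSome_get?]; exact hc
        cases h : d.get? x with
        | none => simp [h] at this
        | some v => simp [List.mem_cons]
      · simp [List.mem_cons, hx]
    · simp only [Bool.not_eq_true] at hc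
      simp only [hc, Bool.false_eq_true, if_false]
      by_cases hx : x = o
      · subst hx
        have hn : d.get? x = none := by
          cases h : d.get? x with
          | none => rfl
          | some v =>
            have : d.contains x = (d.get? x).isSome := PySem.Dict.contains_eq_isSome_get? ..
            rw [h] at this; simp [this] at hc
        simp [PySem.Dict.get?_insert_self, hn, List.mem_cons]
      · rw [PySem.Dict.get?_insert_of_ne _ _ hx]
        simp [List.mem_cons, hx]

theorem pv_get?_indexFold (l : List (Int × List Int)) :
    ∀ (d : PySem.Dict Int Int) (x : Int),
    (l.foldl (fun primeiro p =>
        p.2.foldl (fun primeiro o => if primeiro.contains o then primeiro else primeiro.insert o p.1) primeiro) d).get? x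
      = (d.get? x).or (pvInnerA l x) := by
  induction l with
  | nil => intro d x; simp [pvInnerA]
  | cons p l ih =>
    intro d x
    simp only [List.foldl_cons, ih, pv_get?_innerFold]
    cases p with
    | mk pid os =>
      simp only [pvInnerA]
      by_cases hx : x ∈ os
      · simp only [hx, if_pos]
        cases d.get? x <;> simp
      · simp [hx]

theorem pv_indexB_get? (partidas : List (Int × List Int)) (x : Int) :
    (pvIndexB partidas).get? x = pvInnerA partidas x := by
  unfold pvIndexB
  rw [pv_get?_indexFold]
  simp

theorem pv_portA_items (partidas : List (Int × List Int))
    (h : (partidas.map Prod.fst).Nodup) :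
    criar_dicionario_id_proxima_partida partidas
      = partidas.map (fun p => (p.1, pvInnerA partidas p.1)) := by
  unfold criar_dicionario_id_proxima_partida
  have := PySem.Dict.items_foldl_insert_fresh partidas Prod.fst
      (fun p => pvInnerA partidas p.1) PySem.Dict.empty
      (by intro a _; simp) (by simpa using h)
  simpa using this

-- ===== VERDICT (by name: the statement is the Claim_ definition above) =====
theorem criar_dicionario_id_proxima_partida_spec : Claim_equal_criar_dicionario_id_proxima_partida := by
  intro partidas _ hpre
  unfold Spec_criar_dicionario_id_proxima_partida criar_dicionario_id_proxima_partida_alt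
  rw [pv_portA_items partidas hpre]
  exact List.map_congr_left (fun p _ => by rw [pv_indexB_get? partidas p.1])
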